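-- pv_equiv track=rewrite | github.com/fred-wang/MathTestFonts | generate-fonts.py | mathKern
-- ===== SOURCE A (Python) =====
-- def mathKern(aCodePoint):
--     height = 10
--     kern = 5
--     count = aCodePoint % 11
--     t = []
--     if count > 0:
--         for i in range(0, count):
--             height += 5 + aCodePoint % 17
--             kern += 7 + aCodePoint % 23
--             t.append((height, kern))
--     return tuple(t)
-- ===== SOURCE B (Python) =====
-- def mathKern(aCodePoint):
--     dh = 5 + aCodePoint % 17
--     dk = 7 + aCodePoint % 23
--     return tuple((10 + i * dh, 5 + i * dk) for i in range(1, aCodePoint % 11 + 1))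
-- ===== Notes on version B (the rewrite author's own statement) =====
-- stated objective: simpler
-- what changed: Replaces the running height/kern accumulators and manual list-append loop by a closed-form: computes the two per-step increments once and builds the tuple directly by index with (10 + i*dh, 5 + i*dk) for i in 1..count.
import Mathlib
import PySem

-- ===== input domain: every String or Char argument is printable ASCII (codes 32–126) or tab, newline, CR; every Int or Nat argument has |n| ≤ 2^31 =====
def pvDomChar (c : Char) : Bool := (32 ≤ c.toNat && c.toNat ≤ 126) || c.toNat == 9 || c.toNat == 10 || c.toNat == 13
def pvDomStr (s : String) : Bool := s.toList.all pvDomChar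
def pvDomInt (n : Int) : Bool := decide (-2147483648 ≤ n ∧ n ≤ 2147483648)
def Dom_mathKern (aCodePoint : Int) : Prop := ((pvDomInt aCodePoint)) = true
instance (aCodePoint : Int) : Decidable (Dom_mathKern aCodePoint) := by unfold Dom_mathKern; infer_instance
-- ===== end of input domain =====

-- B replaces A's running height/kern accumulators by closed-form indexed pairs; objective: simpler.


-- ===== PORT A =====
-- literal transliteration: running height/kern state, list grown by append inside the loop
def mathKern (aCodePoint : Int) : List (Int × Int) :=
  let count := PySem.Int.mod aCodePoint 11
  let st :=
    if count > 0 then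
      (PySem.List.pyRange 0 count 1).foldl
        (fun (st : Int × Int × List (Int × Int)) _ =>
          let height := st.1 + (5 + PySem.Int.mod aCodePoint 17)
          let kern := st.2.1 + (7 + PySem.Int.mod aCodePoint 23)
          (height, kern, st.2.2 ++ [(height, kern)]))
        (10, 5, [])
    else (10, 5, [])
  st.2.2

-- ===== PORT B =====
-- literal transliteration of Source B: per-step increments computed once, closed-form indexed pairs
def mathKern_alt (aCodePoint : Int) : List (Int × Int) :=
  let dh := 5 + PySem.Int.mod aCodePoint 17
  let dk := 7 + PySem.Int.mod aCodePoint 23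
  (PySem.List.pyRange 1 (PySem.Int.mod aCodePoint 11 + 1) 1).map
    (fun i => (10 + i * dh, 5 + i * dk))

-- ===== PRECONDITION & SPEC =====
def Spec_mathKern (aCodePoint : Int) (out : List (Int × Int)) : Prop := out = mathKern_alt aCodePoint
instance (aCodePoint : Int) (out : List (Int × Int)) : Decidable (Spec_mathKern aCodePoint out) := by unfold Spec_mathKern; infer_instance

-- ===== CLAIM (what is proved, stated in full; the proofs are below) =====
def Claim_equal_mathKern : Prop := ∀ (aCodePoint : Int), Dom_mathKern aCodePoint → Spec_mathKern aCodePoint (mathKern aCodePoint)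

-- ===== LEMMAS AND PROOFS =====

-- the accumulator loop of A, run n steps, computed in closed form
theorem mathKern_foldl_closed (dh dk : Int) (n : Nat) :
    (List.range n).foldl
      (fun (st : Int × Int × List (Int × Int)) (_ : Nat) =>
        let height := st.1 + dh
        let kern := st.2.1 + dk
        (height, kern, st.2.2 ++ [(height, kern)]))
      (10, 5, [])
    = (10 + n * dh, 5 + n * dk,
       (List.range n).map (fun (k : Nat) => (10 + ((k : Int) + 1) * dh, 5 + ((k : Int) + 1) * dk))) := by
  induction n with
  | zero => simp
  | succ n ih =>
    rw [List.range_succ, List.foldl_append, ih, List.map_append]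
    simp only [List.foldl_cons, List.foldl_nil, List.map_cons, List.map_nil]
    push_cast
    simp only [Prod.mk.injEq, List.append_cancel_left_eq, List.cons.injEq, and_true]
    refine ⟨by ring, by ring, by ring, by ring⟩

theorem mathKern_spec : Claim_equal_mathKern := by
  intro a _
  unfold Spec_mathKern mathKern mathKern_alt
  set c := PySem.Int.mod a 11 with hc
  have hc0 : 0 ≤ c := by
    rw [hc, PySem.Int.mod_eq_emod_of_pos (by norm_num)]
    exact Int.emod_nonneg a (by norm_num)
  simp only []
  rw [PySem.List.pyRange_one 0 c, PySem.List.pyRange_one 1 (c + 1)]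
  rw [List.foldl_map]
  by_cases h : c > 0
  · rw [if_pos h]
    rw [mathKern_foldl_closed]
    simp only [sub_zero, add_sub_cancel_right]
    rw [List.map_map]
    refine List.map_congr_left ?_
    intro k _
    simp only [Function.comp_apply, Prod.mk.injEq]
    constructor <;> ring
  · rw [if_neg h]
    have : c = 0 := le_antisymm (by omega) hc0
    simp [this]
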